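-- pv_equiv track=rewrite | github.com/devrimakinci/CSE321-HOMEWORKS | HW2/findRottenWalnut[141044052].py | inList
-- ===== SOURCE A (Python) =====
-- def inList(List):
-- 	size = len(List)
-- 	i = 0
-- 	dif = False
-- 	while i != size-1:
-- 		if List[i] != List[i+1]:
-- 			dif = True
-- 			return dif
-- 		else:
-- 			dif = False
-- 		i = i+1
-- 	return dif
-- ===== SOURCE B (Python) =====
-- def inList(List):
--     first = List[0]
--     return any(x != first for x in List)
-- ===== Notes on version B (the rewrite author's own statement) =====
-- stated objective: idiomatic
-- what changed: Replaces the index-driven adjacent-pair while loop with a single any() comparing every element to the first element (not-all-equal-to-first is equivalent to some-adjacent-pair-differs); the empty list, on which both raise IndexError, is excluded by Pre_.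
import Mathlib
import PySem

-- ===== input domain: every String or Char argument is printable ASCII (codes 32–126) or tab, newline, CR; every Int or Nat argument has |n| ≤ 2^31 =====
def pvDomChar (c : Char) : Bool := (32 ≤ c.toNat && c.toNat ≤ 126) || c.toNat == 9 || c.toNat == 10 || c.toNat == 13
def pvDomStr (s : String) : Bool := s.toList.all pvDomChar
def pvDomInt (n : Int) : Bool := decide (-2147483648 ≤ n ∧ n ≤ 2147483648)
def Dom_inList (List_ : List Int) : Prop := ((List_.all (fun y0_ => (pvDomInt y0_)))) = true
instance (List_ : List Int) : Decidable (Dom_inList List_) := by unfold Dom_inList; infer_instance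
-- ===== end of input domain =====

-- B replaces A's index-driven adjacent-pair while loop with a single any() comparing each element to the first (idiomatic, same cost).


-- ===== PORT A =====
-- A's while loop: i runs until i = size-1; an out-of-range List[i] (only reachable for
-- the empty list, excluded by Pre_) is an IndexError, modelled by returning false.
-- fuel = List_.length bounds the loop (it runs at most size-1 iterations), a pure
-- termination device, not part of the algorithm.
def inListGo (List_ : List Int) (size : Int) (i : Int) : Nat → Bool
  | 0 => false
  | fuel + 1 =>
    if i = size - 1 then false
    else
      match PySem.List.pyGet? List_ i, PySem.List.pyGet? List_ (i + 1) with
      | some a, some b => if a ≠ b then true else inListGo List_ size (i + 1) fuel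
      | _, _ => false  -- IndexError (outside Pre_)

def inList (List_ : List Int) : Bool :=
  inListGo List_ (List_.length : Int) 0 List_.length

-- ===== PORT B =====
def inList_alt (List_ : List Int) : Bool :=
  match PySem.List.pyGet? List_ 0 with
  | none => false  -- IndexError on first = List[0] (outside Pre_)
  | some first => List_.any (fun x => x ≠ first)

-- ===== PRECONDITION & SPEC =====
-- Pre_ excludes only the empty list, on which both A and B raise IndexError.
def Pre_inList (List_ : List Int) : Prop := List_ ≠ []
instance (List_ : List Int) : Decidable (Pre_inList List_) := by unfold Pre_inList; infer_instance
def pvWitness_inList : List Int := [1, 2, 1]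

def Spec_inList (List_ : List Int) (out : Bool) : Prop := out = inList_alt List_
instance (List_ : List Int) (out : Bool) : Decidable (Spec_inList List_ out) := by unfold Spec_inList; infer_instance

-- ===== CLAIM (what is proved, stated in full; the proofs are below) =====
def Claim_equal_inList : Prop := ∀ (List_ : List Int), Dom_inList List_ → Pre_inList List_ → Spec_inList List_ (inList List_)

-- ===== LEMMAS AND PROOFS =====

-- adjacent-pair characterisation of A's loop
def chkAdj : List Int → Bool
  | [] => false
  | [_] => false
  | a :: b :: r => (a ≠ b : Bool) || chkAdj (b :: r)

theorem inListGo_eq_chkAdj (fuel : Nat) :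
    ∀ (L : List Int) (i : Nat), L.length ≤ i + fuel →
      inListGo L (L.length : Int) (i : Int) fuel = chkAdj (L.drop i) := by
  induction fuel with
  | zero =>
    intro L i h
    have : L.drop i = [] := List.drop_eq_nil_of_le (by omega)
    simp [inListGo, this, chkAdj]
  | succ n ih =>
    intro L i h
    by_cases hi : i + 1 = L.length
    · -- i = size - 1: loop exits, drop i L is a singleton
      have hlt : i < L.length := by omega
      have hdrop : L.drop i = [L[i]] := by
        have := List.drop_eq_getElem_cons hlt
        rw [this, List.drop_eq_nil_of_le (by omega)]
      simp [inListGo, hdrop, chkAdj]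
      omega
    · simp only [inListGo]
      rw [if_neg (by omega)]
      by_cases hlt : i + 1 < L.length
      · have h1 : PySem.List.pyGet? L (i : Int) = some L[i] := by
          rw [PySem.List.pyGet?_natCast]; simp [List.getElem?_eq_getElem (by omega : i < L.length)]
        have h2 : PySem.List.pyGet? L ((i : Int) + 1) = some L[i+1] := by
          have : ((i : Int) + 1) = ((i + 1 : Nat) : Int) := by push_cast; ring
          rw [this, PySem.List.pyGet?_natCast]
          simp [List.getElem?_eq_getElem hlt]
        have hdrop : L.drop i = L[i] :: L.drop (i+1) := List.drop_eq_getElem_cons (by omega)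
        have hdrop2 : L.drop (i+1) = L[i+1] :: L.drop (i+2) := List.drop_eq_getElem_cons hlt
        rw [h1, h2, hdrop, hdrop2]
        show (if L[i] ≠ L[i+1] then true else inListGo L (L.length : Int) ((i : Int) + 1) n)
              = chkAdj (L[i] :: L[i+1] :: L.drop (i+2))
        have hcast : ((i : Int) + 1) = ((i + 1 : Nat) : Int) := by push_cast; ring
        rcases eq_or_ne L[i] L[i+1] with hab | hab
        · rw [if_neg (by simp [hab]), hcast, ih L (i+1) (by omega), hdrop2]
          simp [chkAdj, hab]
        · rw [if_pos hab]
          simp [chkAdj, hab]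
      · -- i ≥ length: IndexError branch, drop is empty
        have hge : L.length ≤ i := by omega
        have h1 : PySem.List.pyGet? L (i : Int) = none := by
          rw [PySem.List.pyGet?_natCast]; simp [List.getElem?_eq_none hge]
        rw [h1]
        simp [List.drop_eq_nil_of_le hge, chkAdj]

theorem chkAdj_eq_any (l : List Int) : ∀ (a : Int), chkAdj (a :: l) = l.any (fun x => x ≠ a) := by
  induction l with
  | nil => intro a; simp [chkAdj]
  | cons b r ih =>
    intro a
    by_cases hab : a = b
    · subst hab
      simp [chkAdj, ih a]
    · simp [chkAdj, hab]
      exact Or.inl (Ne.symm hab)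

-- ===== VERDICT (by name: the statement is the Claim_ definition above) =====
theorem inList_spec : Claim_equal_inList := by
  unfold Claim_equal_inList
  intro List_ _ hpre
  unfold Spec_inList inList inList_alt
  obtain ⟨a, t, rfl⟩ : ∃ a t, List_ = a :: t := by
    cases List_ with
    | nil => exact absurd rfl hpre
    | cons a t => exact ⟨a, t, rfl⟩
  have h0 : ((0 : Nat) : Int) = (0 : Int) := rfl
  rw [← h0, inListGo_eq_chkAdj (a :: t).length (a :: t) 0 (by omega)]
  simp only [List.drop_zero, chkAdj_eq_any]
  simp [List.any_cons]
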